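-- pv_equiv track=rewrite | github.com/MacHu-GWU/rstobj-project | rstobj/markup/header.py | to_label
-- ===== SOURCE A (Python) =====
-- dash_char_list = " _~"
--
-- ignore_char_list = """`*()[]{}<>"'"""
--
-- def to_label(title: str) -> str:
--     """
--     slugify title and convert to reference label.
--
--     :rtype: str
--     """
--     for char in dash_char_list:
--         title = title.replace(char, "-")
--     for char in ignore_char_list:
--         title = title.replace(char, "")
--     return "-".join([
--         chunk.strip() for chunk in title.split("-") if chunk.strip()
--     ])
-- ===== SOURCE B (Python) =====
-- dash_char_list = " _~"
--
-- ignore_char_list = """`*()[]{}<>"'"""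
--
-- def to_label(title: str) -> str:
--     """
--     slugify title and convert to reference label.
--
--     Single pass: delimiters flush the stripped current buffer as a token;
--     ignored characters are skipped; everything else accumulates.
--     """
--     tokens = []
--     buf = []
--     for ch in title:
--         if ch in " _~-":
--             tok = "".join(buf).strip()
--             if tok:
--                 tokens.append(tok)
--             buf = []
--         elif ch in ignore_char_list:
--             pass
--         else:
--             buf.append(ch)
--     tok = "".join(buf).strip()
--     if tok:
--         tokens.append(tok)
--     return "-".join(tokens)
-- ===== Notes on version B (the rewrite author's own statement) =====
-- stated objective: alternative
-- what changed: Replaced A's 13 whole-string replace passes plus split/strip/join with a single left-to-right pass that maintains a token list and a current buffer, flushing the stripped buffer at each delimiter.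
import Mathlib
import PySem

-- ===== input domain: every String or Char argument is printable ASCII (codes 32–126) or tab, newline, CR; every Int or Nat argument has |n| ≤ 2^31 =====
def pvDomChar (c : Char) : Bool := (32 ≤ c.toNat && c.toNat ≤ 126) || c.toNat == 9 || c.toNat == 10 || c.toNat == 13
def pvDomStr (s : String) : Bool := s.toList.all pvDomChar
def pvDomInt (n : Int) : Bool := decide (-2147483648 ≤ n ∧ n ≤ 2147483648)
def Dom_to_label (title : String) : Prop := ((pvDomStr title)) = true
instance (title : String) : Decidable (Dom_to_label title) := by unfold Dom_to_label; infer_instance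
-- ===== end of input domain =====

-- B replaces A's 13 whole-string replace passes + split/strip/join pipeline by a single
-- left-to-right pass that flushes a stripped buffer at each delimiter (alternative decomposition).


-- ===== PORT A =====
def dash_char_list : String := " _~"

def ignore_char_list : String := "`*()[]{}<>\"'"

def to_label (title : String) : String :=
  let t1 := dash_char_list.toList.foldl (fun t c => PySem.Str.replace t (String.ofList [c]) "-") title
  let t2 := ignore_char_list.toList.foldl (fun t c => PySem.Str.replace t (String.ofList [c]) "") t1
  PySem.Str.join "-"
    ((((PySem.Str.split? t2 "-").getD []).filter
        (fun chunk => PySem.Str.strip chunk != "")).map PySem.Str.strip)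

-- ===== PORT B =====
-- one step of Source B's loop: state = (tokens, current buffer), both over chars
def altStep (st : List (List Char) × List Char) (ch : Char) : List (List Char) × List Char :=
  if (" _~-".toList).contains ch then
    let tok := PySem.Chars.strip st.2
    (if tok = [] then st.1 else st.1 ++ [tok], [])
  else if (ignore_char_list.toList).contains ch then
    st
  else
    (st.1, st.2 ++ [ch])

def to_label_alt (title : String) : String :=
  let st := title.toList.foldl altStep ([], [])
  let tok := PySem.Chars.strip st.2
  PySem.Str.join "-" ((if tok = [] then st.1 else st.1 ++ [tok]).map String.ofList)

-- ===== PRECONDITION & SPEC =====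
def Spec_to_label (title : String) (out : String) : Prop := out = to_label_alt title
instance (title : String) (out : String) : Decidable (Spec_to_label title out) := by unfold Spec_to_label; infer_instance

-- ===== CLAIM (what is proved, stated in full; the proofs are below) =====
def Claim_equal_to_label : Prop := ∀ (title : String), Dom_to_label title → Spec_to_label title (to_label title)

-- ===== LEMMAS AND PROOFS =====

-- character-level effect of A's first two passes: map dash chars to '-', drop ignore chars
def gmap (x : Char) : Char := if x = ' ' then '-' else if x = '_' then '-' else if x = '~' then '-' else x

def keep (x : Char) : Bool := !((ignore_char_list.toList).contains x)

def pre (cs : List Char) : List Char := (cs.map gmap).filter keep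

-- structural split on '-'
def mySplit : List Char → List (List Char)
  | [] => [[]]
  | x :: t => if x = '-' then [] :: mySplit t else (mySplit t).modifyHead (x :: ·)

def clean (chunks : List (List Char)) : List (List Char) :=
  (chunks.map PySem.Chars.strip).filter (fun l => decide (l ≠ []))

def finishSt (st : List (List Char) × List Char) : List (List Char) :=
  if PySem.Chars.strip st.2 = [] then st.1 else st.1 ++ [PySem.Chars.strip st.2]

lemma modifyHead_id' {α : Type} (l : List α) :
    l.modifyHead (fun z => z) = l := by cases l <;> simp

lemma modifyHead_modifyHead {α : Type} (f g : α → α) (l : List α) :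
    (l.modifyHead g).modifyHead f = l.modifyHead (fun x => f (g x)) := by cases l <;> simp

lemma replace_go_single (c : Char) (new : List Char) :
    ∀ (fuel : Nat) (l acc : List Char), l.length ≤ fuel →
      PySem.Chars.replace.go [c] new fuel l acc
        = acc.reverse ++ l.flatMap (fun x => if x = c then new else [x]) := by
  intro fuel
  induction fuel with
  | zero =>
    intro l acc h
    have : l = [] := by cases l <;> simp_all
    subst this
    simp [PySem.Chars.replace.go]
  | succ f ih =>
    intro l acc h
    cases l with
    | nil => simp [PySem.Chars.replace.go]
    | cons x t =>
      by_cases hx : x = c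
      · subst hx
        rw [PySem.Chars.replace.go]
        simp [List.isPrefixOf, ih t _ (by simpa using h)]
      · rw [PySem.Chars.replace.go]
        simp [List.isPrefixOf, hx, Ne.symm hx, ih t _ (by simpa using h)]

lemma replace_single (s : List Char) (c : Char) (new : List Char) :
    PySem.Chars.replace s [c] new = s.flatMap (fun x => if x = c then new else [x]) := by
  have := replace_go_single c new s.length s [] le_rfl
  simpa [PySem.Chars.replace] using this

lemma replace_dash (s : List Char) (c : Char) :
    PySem.Chars.replace s [c] ['-'] = s.map (fun x => if x = c then '-' else x) := by
  rw [replace_single]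
  have : (fun x => if x = c then ['-'] else [x]) = (fun x => [if x = c then '-' else x]) := by
    funext x; by_cases hx : x = c <;> simp [hx]
  rw [this, ← List.map_eq_flatMap]

lemma replace_del (s : List Char) (c : Char) :
    PySem.Chars.replace s [c] [] = s.filter (fun x => x != c) := by
  rw [replace_single]
  induction s with
  | nil => simp
  | cons x t ih =>
    by_cases hx : x = c <;> simp [hx, ih]

lemma gmap_eq (x : Char) :
    (if (if (if x = ' ' then '-' else x) = '_' then '-' else (if x = ' ' then '-' else x)) = '~'
      then '-' else (if (if x = ' ' then '-' else x) = '_' then '-' else (if x = ' ' then '-' else x)))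
    = gmap x := by
  by_cases h1 : x = ' '
  · subst h1; decide
  by_cases h2 : x = '_'
  · subst h2; decide
  by_cases h3 : x = '~'
  · subst h3; decide
  simp [gmap, h1, h2, h3]

lemma pre_spec (title : String) :
    (ignore_char_list.toList.foldl (fun t c => PySem.Str.replace t (String.ofList [c]) "")
      (dash_char_list.toList.foldl (fun t c => PySem.Str.replace t (String.ofList [c]) "-") title)).toList
    = pre title.toList := by
  have hd : dash_char_list.toList = [' ', '_', '~'] := rfl
  have hi : ignore_char_list.toList = ['`','*','(',')','[',']','{','}','<','>','"','\''] := rfl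
  rw [hd, hi]
  simp only [List.foldl]
  simp only [PySem.Str.toList_replace, String.toList_ofList]
  simp only [show ("-" : String).toList = ['-'] from rfl, show ("" : String).toList = [] from rfl]
  simp only [replace_dash, replace_del, List.map_map, List.filter_filter]
  unfold pre
  congr 1
  · funext a
    by_cases h1 : a = '\''
    · subst h1; decide
    by_cases h2 : a = '"'
    · subst h2; decide
    by_cases h3 : a = '>'
    · subst h3; decide
    by_cases h4 : a = '<'
    · subst h4; decide
    by_cases h5 : a = '}'
    · subst h5; decide
    by_cases h6 : a = '{'
    · subst h6; decide
    by_cases h7 : a = ']'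
    · subst h7; decide
    by_cases h8 : a = '['
    · subst h8; decide
    by_cases h9 : a = ')'
    · subst h9; decide
    by_cases h10 : a = '('
    · subst h10; decide
    by_cases h11 : a = '*'
    · subst h11; decide
    by_cases h12 : a = '`'
    · subst h12; decide
    simp [keep, hi, h1, h2, h3, h4, h5, h6, h7, h8, h9, h10, h11, h12]
  · apply List.map_congr_left
    intro x _
    simp only [Function.comp]
    exact gmap_eq x

lemma splitOn_go_single :
    ∀ (fuel : Nat) (l cur : List Char) (acc : List (List Char)), l.length ≤ fuel →
      PySem.Chars.splitOn.go ['-'] fuel l cur acc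
        = acc.reverse ++ (mySplit l).modifyHead (fun z => cur.reverse ++ z) := by
  intro fuel
  induction fuel with
  | zero =>
    intro l cur acc h
    have : l = [] := by cases l <;> simp_all
    subst this
    simp [PySem.Chars.splitOn.go, mySplit]
  | succ f ih =>
    intro l cur acc h
    cases l with
    | nil => simp [PySem.Chars.splitOn.go, mySplit]
    | cons x t =>
      by_cases hx : x = '-'
      · subst hx
        rw [PySem.Chars.splitOn.go]
        simp only [List.isPrefixOf, BEq.rfl, Bool.and_true, if_pos]
        rw [show List.drop ['-'].length ('-'::t) = t from rfl, ih t _ _ (by simpa using h)]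
        simp [mySplit, modifyHead_id']
      · rw [PySem.Chars.splitOn.go]
        simp only [List.isPrefixOf, Bool.and_true]
        rw [if_neg (by simp [Ne.symm hx])]
        rw [ih t _ _ (by simpa using h)]
        simp only [mySplit]
        rw [if_neg hx, modifyHead_modifyHead]
        simp

lemma splitOn_single (s : List Char) :
    PySem.Chars.splitOn s ['-'] = mySplit s := by
  rw [PySem.Chars.splitOn, splitOn_go_single (s.length + 1) s [] [] (by omega)]
  simp [modifyHead_id']

lemma pre_cons (x : Char) (rest : List Char) :
    pre (x :: rest) = (if keep (gmap x) then [gmap x] else []) ++ pre rest := by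
  simp only [pre, List.map_cons, List.filter_cons]
  split <;> simp_all

lemma foldB (cs : List Char) :
    ∀ (toks : List (List Char)) (buf : List Char),
      finishSt (cs.foldl altStep (toks, buf))
        = toks ++ clean ((mySplit (pre cs)).modifyHead (fun z => buf ++ z)) := by
  induction cs with
  | nil =>
    intro toks buf
    simp only [List.foldl_nil, pre, List.map_nil, List.filter_nil, mySplit, List.modifyHead,
      clean, finishSt, List.map_cons, List.map_nil, List.filter_cons, List.append_nil]
    split <;> simp_all
  | cons x rest ih =>
    intro toks buf
    by_cases hdelim : x = ' ' ∨ x = '_' ∨ x = '~' ∨ x = '-'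
    · have hc : (" _~-".toList).contains x = true := by
        rcases hdelim with rfl | rfl | rfl | rfl <;> decide
      have hg : gmap x = '-' := by rcases hdelim with rfl | rfl | rfl | rfl <;> decide
      have hkg : keep (gmap x) = true := by rw [hg]; decide
      have hpre : pre (x :: rest) = '-' :: pre rest := by
        rw [pre_cons, hg, if_pos (hg ▸ hkg)]; rfl
      have hstep : altStep (toks, buf) x
          = ((if PySem.Chars.strip buf = [] then toks else toks ++ [PySem.Chars.strip buf]), []) := by
        unfold altStep; rw [hc]; simp
      have hnil : (fun z : List Char => [] ++ z) = fun z => z := by funext z; simp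
      have hms : mySplit ('-' :: pre rest) = [] :: mySplit (pre rest) := by simp [mySplit]
      have hmh : List.modifyHead (fun z => buf ++ z) ([] :: mySplit (pre rest))
          = buf :: mySplit (pre rest) := by simp
      rw [List.foldl_cons, hstep, ih _ [], hpre, hms, hmh, hnil, modifyHead_id']
      by_cases hb : PySem.Chars.strip buf = [] <;>
        simp [clean, hb]
    · push_neg at hdelim
      obtain ⟨h1, h2, h3, h4⟩ := hdelim
      have hc : (" _~-".toList).contains x = false := by
        rw [show (" _~-".toList) = [' ', '_', '~', '-'] from rfl, List.contains_eq_mem]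
        simp [h1, h2, h3, h4]
      have hgx : gmap x = x := by simp [gmap, h1, h2, h3]
      by_cases hign : x ∈ ignore_char_list.toList
      · have hci : (ignore_char_list.toList).contains x = true := by
          rw [List.contains_eq_mem]; simp [hign]
        have hk : keep (gmap x) = false := by
          rw [hgx]; unfold keep; rw [hci]; rfl
        have hpre : pre (x :: rest) = pre rest := by rw [pre_cons, if_neg (by simp [hk])]; rfl
        have hstep : altStep (toks, buf) x = (toks, buf) := by
          unfold altStep; rw [hc, hci]; simp
        rw [List.foldl_cons, hstep, ih, hpre]
      · have hci : (ignore_char_list.toList).contains x = false := by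
          rw [List.contains_eq_mem]; simp [hign]
        have hk : keep (gmap x) = true := by
          rw [hgx]; unfold keep; rw [hci]; rfl
        have hpre : pre (x :: rest) = x :: pre rest := by
          rw [pre_cons, if_pos hk, hgx]; rfl
        have hstep : altStep (toks, buf) x = (toks, buf ++ [x]) := by
          unfold altStep; rw [hc, hci]; simp
        have hms : mySplit (x :: pre rest) = (mySplit (pre rest)).modifyHead (x :: ·) := by
          simp [mySplit, h4]
        rw [List.foldl_cons, hstep, ih, hpre, hms, modifyHead_modifyHead]
        simp

lemma strip_ne_empty (chunk : String) :
    (PySem.Str.strip chunk != "") = decide (PySem.Chars.strip chunk.toList ≠ []) := by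
  have : (PySem.Str.strip chunk = "") ↔ (PySem.Chars.strip chunk.toList = []) := by
    rw [← String.toList_inj, PySem.Str.toList_strip]
    rfl
  by_cases h : PySem.Chars.strip chunk.toList = []
  · simp [bne, this.mpr h, h]
  · have h2 : PySem.Str.strip chunk ≠ "" := fun e => h (this.mp e)
    simp [bne, h2, h]

-- ===== VERDICT (by name: the statement is the Claim_ definition above) =====
theorem to_label_spec : Claim_equal_to_label := by
  intro title _
  unfold Spec_to_label to_label to_label_alt
  dsimp only
  rw [← String.toList_inj]
  -- name A's intermediate string
  set t2 := ignore_char_list.toList.foldl (fun t c => PySem.Str.replace t (String.ofList [c]) "")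
      (dash_char_list.toList.foldl (fun t c => PySem.Str.replace t (String.ofList [c]) "-") title)
    with ht2
  -- A's split returns some list whose char lists form mySplit (pre title.toList)
  have hsplit : Option.map (fun x => List.map String.toList x) (PySem.Str.split? t2 "-")
      = some (mySplit (pre title.toList)) := by
    rw [PySem.Str.split?_map]
    rw [show ("-" : String).toList = ['-'] from rfl]
    rw [PySem.Chars.split?]
    rw [if_neg (by decide)]
    rw [pre_spec, splitOn_single]
  obtain ⟨L, hL, hLmap⟩ : ∃ L, PySem.Str.split? t2 "-" = some L ∧
      L.map String.toList = mySplit (pre title.toList) := by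
    cases h : PySem.Str.split? t2 "-" with
    | none => rw [h] at hsplit; simp at hsplit
    | some L => rw [h] at hsplit; exact ⟨L, rfl, by simpa using hsplit⟩
  rw [hL]
  simp only [Option.getD_some, PySem.Str.toList_join]
  -- B side: collapse the ofList round trip and apply the loop invariant
  have hB : List.map String.toList
      (List.map String.ofList
        (if PySem.Chars.strip (title.toList.foldl altStep ([], [])).2 = []
          then (title.toList.foldl altStep ([], [])).1
          else (title.toList.foldl altStep ([], [])).1
            ++ [PySem.Chars.strip (title.toList.foldl altStep ([], [])).2]))
      = clean (mySplit (pre title.toList)) := by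
    change List.map String.toList
      (List.map String.ofList (finishSt (title.toList.foldl altStep ([], [])))) = _
    rw [List.map_map, show String.toList ∘ String.ofList = id from funext (fun l => String.toList_ofList)]
    rw [List.map_id]
    rw [foldB title.toList [] []]
    rw [show (fun z : List Char => [] ++ z) = fun z => z from funext (fun z => by simp),
      modifyHead_id']
    simp
  -- A side: filter-then-strip over L is clean of the char-list split
  have hA : List.map String.toList
      (List.map PySem.Str.strip (L.filter (fun chunk => PySem.Str.strip chunk != "")))
      = clean (mySplit (pre title.toList)) := by
    rw [← hLmap]
    unfold clean
    have hfun : String.toList ∘ PySem.Str.strip = PySem.Chars.strip ∘ String.toList :=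
      funext (fun s => PySem.Str.toList_strip s)
    simp only [List.map_map, List.filter_map, hfun]
    congr 1
    apply List.filter_congr
    intro chunk _
    simpa using strip_ne_empty chunk
  rw [show ("-" : String).toList = ['-'] from rfl] at *
  rw [hA, hB]
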